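-- pv_equiv track=rewrite | github.com/AnimeshTalukdar/LeetCode-leethub | Total Cuts - GFG/total-cuts.py | totalCuts
-- ===== SOURCE A (Python) =====
-- from typing import List
--
-- def totalCuts(N: int, K: int, A: List[int]) -> int:
--     max_left = [A[0]] * N
--     min_right = [A[-1]] * N
--
--     for i in range(1, N):
--         max_left[i] = max(max_left[i-1], A[i])
--
--     for i in range(N-2, -1, -1):
--         min_right[i] = min(min_right[i+1], A[i])
--
--     count = 0
--     for i in range(N-1):
--         if max_left[i] + min_right[i+1] >= K:
--             count += 1
--
--     return count
-- ===== SOURCE B (Python) =====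
-- def totalCuts(N, K, A):
--     if N <= 1:
--         return 0
--     # suffix minima for cut points: mr[i] == min(A[i+1..N-2] + [A[-1]])
--     mr = [A[-1]]
--     for j in range(N - 2, 0, -1):
--         mr.append(min(mr[-1], A[j]))
--     mr.reverse()
--     # prefix max is nondecreasing and mr is nondecreasing, so valid cuts
--     # form a suffix: return its length at the first valid cut.
--     mx = A[0]
--     for i, m in enumerate(mr):
--         mx = max(mx, A[i])
--         if mx + m >= K:
--             return N - 1 - i
--     return 0
-- ===== Notes on version B (the rewrite author's own statement) =====
-- stated objective: alternative
-- what changed: B exploits that prefix-max and suffix-min are both nondecreasing in the cut index, so valid cuts form a contiguous suffix: it builds only the suffix-min array and scans with a running maximum, returning N-1-i at the first valid cut instead of building the prefix-max array and counting every index.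
import Mathlib
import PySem

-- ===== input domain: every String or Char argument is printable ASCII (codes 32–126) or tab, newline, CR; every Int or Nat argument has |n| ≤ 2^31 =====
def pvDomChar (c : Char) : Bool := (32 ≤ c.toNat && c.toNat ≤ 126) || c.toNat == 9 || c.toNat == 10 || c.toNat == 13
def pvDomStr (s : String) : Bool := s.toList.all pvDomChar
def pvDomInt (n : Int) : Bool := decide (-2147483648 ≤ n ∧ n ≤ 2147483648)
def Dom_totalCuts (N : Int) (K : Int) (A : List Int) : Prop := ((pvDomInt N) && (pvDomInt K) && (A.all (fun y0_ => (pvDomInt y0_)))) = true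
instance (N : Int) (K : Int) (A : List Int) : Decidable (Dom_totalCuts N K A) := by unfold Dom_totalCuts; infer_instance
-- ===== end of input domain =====

-- B replaces the prefix-max array + per-index counting with a suffix-min array
-- and a single left-to-right scan with a running maximum that early-returns
-- N-1-i at the first valid cut (the valid cuts form a contiguous suffix);
-- objective: alternative decomposition, same asymptotic cost.

-- ===== PORT A =====
def totalCuts (N : Int) (K : Int) (A : List Int) : Int :=
  let a0 := PySem.List.pyGetD A 0 0
  let aL := PySem.List.pyGetD A (-1) 0
  let ml0 := List.replicate N.toNat a0
  let mr0 := List.replicate N.toNat aL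
  let ml := (PySem.List.pyRange 1 N 1).foldl
      (fun ml i => PySem.List.pySetD ml i
        (max (PySem.List.pyGetD ml (i-1) 0) (PySem.List.pyGetD A i 0))) ml0
  let mr := (PySem.List.pyRange (N-2) (-1) (-1)).foldl
      (fun mr i => PySem.List.pySetD mr i
        (min (PySem.List.pyGetD mr (i+1) 0) (PySem.List.pyGetD A i 0))) mr0
  (PySem.List.pyRange 0 (N-1) 1).foldl
      (fun c i => if K ≤ PySem.List.pyGetD ml i 0 + PySem.List.pyGetD mr (i+1) 0
                  then c + 1 else c) 0

-- ===== PORT B =====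
-- the 'for i, m in enumerate(mr)' loop with early return, as structural recursion on mr
def altLoop (K : Int) (N : Int) (A : List Int) (mx : Int) (i : Int) : List Int → Int
  | [] => 0
  | m :: rest =>
      let mx' := max mx (PySem.List.pyGetD A i 0)
      if K ≤ mx' + m then N - 1 - i else altLoop K N A mx' (i + 1) rest

def totalCuts_alt (N : Int) (K : Int) (A : List Int) : Int :=
  if N ≤ 1 then 0
  else
    let mr := (PySem.List.pyRange (N-2) 0 (-1)).foldl
        (fun mr j => mr ++ [min (PySem.List.pyGetD mr (-1) 0) (PySem.List.pyGetD A j 0)])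
        [PySem.List.pyGetD A (-1) 0]
    altLoop K N A (PySem.List.pyGetD A 0 0) 0 mr.reverse

-- ===== PRECONDITION & SPEC =====
-- Pre_ excludes exactly the inputs where Python A raises IndexError: the empty
-- list (A[0]) and N > len(A) (the first loop reads A[i] for i up to N-1).
def Pre_totalCuts (N : Int) (K : Int) (A : List Int) : Prop :=
  A ≠ [] ∧ N ≤ A.length
instance (N : Int) (K : Int) (A : List Int) : Decidable (Pre_totalCuts N K A) := by
  unfold Pre_totalCuts; infer_instance
def pvWitness_totalCuts : Int × Int × List Int := (4, 7, [2, 5, 1, 6])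

def Spec_totalCuts (N : Int) (K : Int) (A : List Int) (out : Int) : Prop := out = totalCuts_alt N K A
instance (N : Int) (K : Int) (A : List Int) (out : Int) : Decidable (Spec_totalCuts N K A out) := by unfold Spec_totalCuts; infer_instance

-- ===== CLAIM (what is proved, stated in full; the proofs are below) =====
def Claim_equal_totalCuts : Prop := ∀ (N : Int) (K : Int) (A : List Int), Dom_totalCuts N K A → Pre_totalCuts N K A → Spec_totalCuts N K A (totalCuts N K A)

-- ===== LEMMAS AND PROOFS =====

-- prefix maximum: pm A i = max(A[0], …, A[i]) (getD view, default 0)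
def pm (A : List Int) : Nat → Int
  | 0 => A.getD 0 0
  | i + 1 => max (pm A i) (A.getD (i + 1) 0)

-- suffix minimum with seed lastv at index n-1: sm j = min(A[j..n-2] + [lastv])
def sm (A : List Int) (n : Nat) (lastv : Int) (j : Nat) : Int :=
  if j + 1 < n then min (sm A n lastv (j + 1)) (A.getD j 0) else lastv
termination_by n - j

lemma pm_mono (A : List Int) {i j : Nat} (h : i ≤ j) : pm A i ≤ pm A j := by
  induction j with
  | zero => simp_all
  | succ j ih =>
    rcases Nat.lt_or_ge i (j + 1) with h' | h'
    · exact le_trans (ih (by omega)) (by simp [pm])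
    · have : i = j + 1 := by omega
      simp [this]

lemma sm_succ_ge (A : List Int) (n : Nat) (lastv : Int) (j : Nat) :
    sm A n lastv j ≤ sm A n lastv (j + 1) := by
  rw [sm]
  split
  · exact min_le_left _ _
  · rw [sm]
    have : ¬ j + 1 + 1 < n := by omega
    simp [this]

lemma sm_mono (A : List Int) (n : Nat) (lastv : Int) {i j : Nat} (h : i ≤ j) :
    sm A n lastv i ≤ sm A n lastv j := by
  induction j with
  | zero => simp_all
  | succ j ih =>
    rcases Nat.lt_or_ge i (j + 1) with h' | h'
    · exact le_trans (ih (by omega)) (sm_succ_ge A n lastv j)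
    · have : i = j + 1 := by omega
      simp [this]

-- characterization of A's first loop
lemma ml_fold (A : List Int) (N : Int) :
    ∀ (fuel : Nat) (k : Int) (l : List Int), (N - k).toNat ≤ fuel → 1 ≤ k →
    l.length = N.toNat →
    (∀ i : Nat, (i : Int) < k → i < N.toNat → l.getD i 0 = pm A i) →
    ∀ i : Nat, i < N.toNat →
      ((PySem.List.pyRange k N 1).foldl
        (fun ml i => PySem.List.pySetD ml i
          (max (PySem.List.pyGetD ml (i-1) 0) (PySem.List.pyGetD A i 0))) l).getD i 0
      = pm A i := by
  intro fuel
  induction fuel with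
  | zero =>
    intro k l hf hk hlen hinv i hi
    have hNk : N ≤ k := by omega
    rw [PySem.List.pyRange_one_eq_nil hNk]
    exact hinv i (by omega) hi
  | succ fuel ih =>
    intro k l hf hk hlen hinv i hi
    by_cases hNk : N ≤ k
    · rw [PySem.List.pyRange_one_eq_nil hNk]
      exact hinv i (by omega) hi
    · rw [PySem.List.pyRange_one_cons (by omega : k < N)]
      simp only [List.foldl_cons]
      have hk0 : (0:Int) ≤ k := by omega
      have hkc : ((k.toNat : Int)) = k := Int.toNat_of_nonneg hk0
      have hk1c : ((k.toNat - 1 : Nat) : Int) = k - 1 := by omega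
      have hkm : (k - 1).toNat = k.toNat - 1 := by omega
      have hklt : k.toNat < N.toNat := by omega
      have hk1 : 1 ≤ k.toNat := by omega
      -- the written value is pm A k.toNat
      have hval : max (PySem.List.pyGetD l (k-1) 0) (PySem.List.pyGetD A k 0) = pm A k.toNat := by
        rw [← hk1c, ← hkc, PySem.List.pyGetD_natCast, PySem.List.pyGetD_natCast]
        simp only [Int.toNat_natCast]
        have h1 : l.getD (k.toNat - 1) 0 = pm A (k.toNat - 1) :=
          hinv (k.toNat - 1) (by omega) (by omega)
        rw [h1]
        obtain ⟨m, hm⟩ : ∃ m, k.toNat = m + 1 := ⟨k.toNat - 1, by omega⟩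
        rw [hm]; simp [pm]
      have hset : PySem.List.pySetD l k (max (PySem.List.pyGetD l (k-1) 0) (PySem.List.pyGetD A k 0))
          = l.set k.toNat (pm A k.toNat) := by
        rw [hval, PySem.List.pySetD_of_nonneg _ _ hk0]
      rw [hset]
      refine ih (k + 1) _ (by omega) (by omega) (by simpa using hlen) ?_ i hi
      intro j hj hjn
      rcases eq_or_ne j k.toNat with rfl | hne
      · rw [List.getD_eq_getElem?_getD]
        simp [hlen ▸ hklt]
      · rw [List.getD_eq_getElem?_getD, List.getElem?_set_ne (by omega),
            ← List.getD_eq_getElem?_getD]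
        exact hinv j (by omega) hjn

-- characterization of A's second loop
lemma mr_fold (A : List Int) (N : Int) (lastv : Int) :
    ∀ (fuel : Nat) (k : Int) (l : List Int), (k + 1).toNat ≤ fuel → k ≤ N - 2 →
    l.length = N.toNat →
    (∀ j : Nat, k < (j : Int) → j < N.toNat → l.getD j 0 = sm A N.toNat lastv j) →
    ∀ j : Nat, j < N.toNat →
      ((PySem.List.pyRange k (-1) (-1)).foldl
        (fun mr i => PySem.List.pySetD mr i
          (min (PySem.List.pyGetD mr (i+1) 0) (PySem.List.pyGetD A i 0))) l).getD j 0
      = sm A N.toNat lastv j := by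
  intro fuel
  induction fuel with
  | zero =>
    intro k l hf hk hlen hinv j hj
    have hkneg : k ≤ -1 := by omega
    rw [PySem.List.pyRange_neg_one_eq_nil hkneg]
    exact hinv j (by omega) hj
  | succ fuel ih =>
    intro k l hf hk hlen hinv j hj
    by_cases hkneg : k ≤ -1
    · rw [PySem.List.pyRange_neg_one_eq_nil hkneg]
      exact hinv j (by omega) hj
    · rw [PySem.List.pyRange_neg_one_cons (by omega : -1 < k)]
      simp only [List.foldl_cons]
      have hk0 : (0:Int) ≤ k := by omega
      have hkc : ((k.toNat : Int)) = k := Int.toNat_of_nonneg hk0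
      have hk1c : ((k.toNat + 1 : Nat) : Int) = k + 1 := by omega
      have hklt : k.toNat + 1 < N.toNat := by omega
      have hval : min (PySem.List.pyGetD l (k+1) 0) (PySem.List.pyGetD A k 0)
          = sm A N.toNat lastv k.toNat := by
        rw [← hk1c, ← hkc, PySem.List.pyGetD_natCast, PySem.List.pyGetD_natCast]
        simp only [Int.toNat_natCast]
        have h1 : l.getD (k.toNat + 1) 0 = sm A N.toNat lastv (k.toNat + 1) :=
          hinv (k.toNat + 1) (by omega) hklt
        rw [h1]
        conv_rhs => rw [sm]
        simp [hklt]
      have hset : PySem.List.pySetD l k (min (PySem.List.pyGetD l (k+1) 0) (PySem.List.pyGetD A k 0))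
          = l.set k.toNat (sm A N.toNat lastv k.toNat) := by
        rw [hval, PySem.List.pySetD_of_nonneg _ _ hk0]
      rw [hset]
      refine ih (k - 1) _ (by omega) (by omega) (by simpa using hlen) ?_ j hj
      intro j' hj' hj'n
      rcases eq_or_ne j' k.toNat with rfl | hne
      · rw [List.getD_eq_getElem?_getD]
        simp [hlen ▸ (by omega : k.toNat < N.toNat)]
      · rw [List.getD_eq_getElem?_getD, List.getElem?_set_ne (by omega),
            ← List.getD_eq_getElem?_getD]
        exact hinv j' (by omega) hj'n

-- B's builder produces the suffix-min values in descending index order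
lemma mrbuild (A : List Int) (N : Int) (lastv : Int) :
    ∀ (fuel : Nat) (k : Int) (l : List Int), k.toNat ≤ fuel → k ≤ N - 2 → l ≠ [] →
    PySem.List.pyGetD l (-1) 0 = sm A N.toNat lastv (k.toNat + 1) →
    (PySem.List.pyRange k 0 (-1)).foldl
        (fun mr j => mr ++ [min (PySem.List.pyGetD mr (-1) 0) (PySem.List.pyGetD A j 0)]) l
    = l ++ (PySem.List.pyRange k 0 (-1)).map (fun j => sm A N.toNat lastv j.toNat) := by
  intro fuel
  induction fuel with
  | zero =>
    intro k l hf hk hne hlast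
    have : k ≤ 0 := by omega
    rw [PySem.List.pyRange_neg_one_eq_nil this]
    simp
  | succ fuel ih =>
    intro k l hf hk hne hlast
    by_cases hk0 : k ≤ 0
    · rw [PySem.List.pyRange_neg_one_eq_nil hk0]; simp
    · rw [PySem.List.pyRange_neg_one_cons (by omega : (0:Int) < k)]
      simp only [List.foldl_cons, List.map_cons]
      have hkc : ((k.toNat : Int)) = k := Int.toNat_of_nonneg (by omega)
      have hklt : k.toNat + 1 < N.toNat := by omega
      have hval : min (PySem.List.pyGetD l (-1) 0) (PySem.List.pyGetD A k 0)
          = sm A N.toNat lastv k.toNat := by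
        rw [hlast, ← hkc, PySem.List.pyGetD_natCast]
        simp only [Int.toNat_natCast]
        conv_rhs => rw [sm]
        rw [if_pos hklt]
      rw [hval]
      have hrec := ih (k - 1) (l ++ [sm A N.toNat lastv k.toNat]) (by omega) (by omega)
        (by simp)
        (by
          rw [PySem.List.pyGetD_neg_one_append_singleton]
          congr 1
          omega)
      rw [hrec, List.append_assoc]
      rfl

-- the scan: given running max invariant, altLoop computes the count of valid cuts
lemma scan_eq (K N : Int) (A : List Int) (lastv : Int) :
    ∀ (fuel : Nat) (i : Int) (mx : Int), (N - 1 - i).toNat ≤ fuel → 0 ≤ i → i ≤ N - 1 →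
    max mx (A.getD i.toNat 0) = pm A i.toNat →
    altLoop K N A mx i ((PySem.List.pyRange (i+1) N 1).map (fun j => sm A N.toNat lastv j.toNat))
    = ((PySem.List.pyRange i (N-1) 1).countP
        (fun t => decide (K ≤ pm A t.toNat + sm A N.toNat lastv (t.toNat + 1))) : Int) := by
  intro fuel
  induction fuel with
  | zero =>
    intro i mx hf h0 hiN hmx
    have hi : i = N - 1 := by omega
    subst hi
    rw [PySem.List.pyRange_one_eq_nil (by omega), PySem.List.pyRange_one_eq_nil (by omega)]
    simp [altLoop]
  | succ fuel ih =>
    intro i mx hf h0 hiN hmx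
    rcases eq_or_lt_of_le hiN with hi | hi
    · subst hi
      rw [PySem.List.pyRange_one_eq_nil (by omega), PySem.List.pyRange_one_eq_nil (by omega)]
      simp [altLoop]
    · have hi1N : i + 1 < N := by omega
      rw [PySem.List.pyRange_one_cons (by omega : i + 1 < N)]
      rw [PySem.List.pyRange_one_cons (by omega : i < N - 1)]
      simp only [List.map_cons, List.countP_cons]
      rw [altLoop]
      have hic : ((i.toNat : Int)) = i := Int.toNat_of_nonneg h0
      have hmx' : max mx (PySem.List.pyGetD A i 0) = pm A i.toNat := by
        rw [← hic, PySem.List.pyGetD_natCast]; exact hmx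
      have hi1c : (i + 1).toNat = i.toNat + 1 := by omega
      rw [hmx', hi1c]
      by_cases hc : K ≤ pm A i.toNat + sm A N.toNat lastv (i.toNat + 1)
      · rw [if_pos hc, decide_eq_true hc]
        -- everything from i on is valid: the count is the whole remaining range
        have hall : ∀ t ∈ PySem.List.pyRange (i+1) (N-1) 1,
            (fun t => decide (K ≤ pm A t.toNat + sm A N.toNat lastv (t.toNat + 1))) t = true := by
          intro t ht
          rw [PySem.List.mem_pyRange_one] at ht
          have h1 : pm A i.toNat ≤ pm A t.toNat := pm_mono A (by omega)
          have h2 : sm A N.toNat lastv (i.toNat + 1) ≤ sm A N.toNat lastv (t.toNat + 1) :=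
            sm_mono A N.toNat lastv (by omega)
          simp only [decide_eq_true_eq]
          omega
        rw [List.countP_eq_length.mpr hall, PySem.List.length_pyRange_one]
        push_cast
        rw [if_pos rfl]
        omega
      · rw [if_neg hc, decide_eq_false hc]
        rw [ih (i + 1) (pm A i.toNat) (by omega) (by omega) (by omega) ?_]
        · push_cast; ring
        · rw [hi1c]
          simp [pm]

-- both ports equal the same count of valid cut indices
lemma totalCuts_eq_count (N K : Int) (A : List Int) :
    totalCuts N K A
    = ((PySem.List.pyRange 0 (N-1) 1).countP
        (fun t => decide (K ≤ pm A t.toNat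
            + sm A N.toNat (PySem.List.pyGetD A (-1) 0) (t.toNat + 1))) : Int) := by
  have hml := ml_fold A N (N - 1).toNat 1 (List.replicate N.toNat (PySem.List.pyGetD A 0 0))
    (by omega) le_rfl (by simp)
    (by
      intro i hi hin
      rw [List.getD_eq_getElem?_getD, List.getElem?_replicate]
      have hi0 : i = 0 := by omega
      subst hi0
      simp only [hin, if_pos]
      simp [pm, PySem.List.pyGetD_zero])
  have hmr := mr_fold A N (PySem.List.pyGetD A (-1) 0) (N - 1).toNat (N - 2)
    (List.replicate N.toNat (PySem.List.pyGetD A (-1) 0)) (by omega) le_rfl (by simp)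
    (by
      intro j hj hjn
      rw [List.getD_eq_getElem?_getD, List.getElem?_replicate]
      simp only [hjn, if_pos]
      rw [sm]
      have : ¬ j + 1 < N.toNat := by omega
      simp [this])
  show (PySem.List.pyRange 0 (N-1) 1).foldl
      (fun c i => if K ≤ PySem.List.pyGetD
          ((PySem.List.pyRange 1 N 1).foldl
            (fun ml i => PySem.List.pySetD ml i
              (max (PySem.List.pyGetD ml (i-1) 0) (PySem.List.pyGetD A i 0)))
            (List.replicate N.toNat (PySem.List.pyGetD A 0 0))) i 0
        + PySem.List.pyGetD
          ((PySem.List.pyRange (N-2) (-1) (-1)).foldl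
            (fun mr i => PySem.List.pySetD mr i
              (min (PySem.List.pyGetD mr (i+1) 0) (PySem.List.pyGetD A i 0)))
            (List.replicate N.toNat (PySem.List.pyGetD A (-1) 0))) (i+1) 0
        then c + 1 else c) 0 = _
  trans ((PySem.List.pyRange 0 (N-1) 1).foldl (fun c t =>
      if K ≤ pm A t.toNat + sm A N.toNat (PySem.List.pyGetD A (-1) 0) (t.toNat + 1)
      then c + 1 else c) 0)
  · apply PySem.List.foldl_congr_mem
    intro acc t ht
    rw [PySem.List.mem_pyRange_one] at ht
    have htc : ((t.toNat : Int)) = t := Int.toNat_of_nonneg ht.1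
    have ht1c : ((t.toNat + 1 : Nat) : Int) = t + 1 := by omega
    rw [← ht1c, ← htc, PySem.List.pyGetD_natCast, PySem.List.pyGetD_natCast]
    simp only [Int.toNat_natCast]
    simp only [hml t.toNat (by omega), hmr (t.toNat + 1) (by omega)]
    rfl
  · rw [PySem.List.foldl_ite_add_one]
    simp

lemma alt_eq_count (N K : Int) (A : List Int) (hN : 2 ≤ N) :
    totalCuts_alt N K A
    = ((PySem.List.pyRange 0 (N-1) 1).countP
        (fun t => decide (K ≤ pm A t.toNat
            + sm A N.toNat (PySem.List.pyGetD A (-1) 0) (t.toNat + 1))) : Int) := by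
  have hbuild := mrbuild A N (PySem.List.pyGetD A (-1) 0) (N - 2).toNat (N - 2)
    [PySem.List.pyGetD A (-1) 0] le_rfl le_rfl (by simp)
    (by
      have hsing := PySem.List.pyGetD_neg_one_append_singleton (xs := ([] : List Int))
        (x := PySem.List.pyGetD A (-1) 0) (d := 0)
      simp only [List.nil_append] at hsing
      rw [hsing, sm]
      have : ¬ (N - 2).toNat + 1 + 1 < N.toNat := by omega
      simp [this])
  show (if N ≤ 1 then 0 else
      altLoop K N A (PySem.List.pyGetD A 0 0) 0
        (((PySem.List.pyRange (N-2) 0 (-1)).foldl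
          (fun mr j => mr ++ [min (PySem.List.pyGetD mr (-1) 0) (PySem.List.pyGetD A j 0)])
          [PySem.List.pyGetD A (-1) 0]).reverse)) = _
  rw [if_neg (by omega), hbuild]
  have hrev : (([PySem.List.pyGetD A (-1) 0] ++ (PySem.List.pyRange (N-2) 0 (-1)).map
        (fun j => sm A N.toNat (PySem.List.pyGetD A (-1) 0) j.toNat)).reverse)
      = (PySem.List.pyRange 1 N 1).map
          (fun j => sm A N.toNat (PySem.List.pyGetD A (-1) 0) j.toNat) := by
    rw [PySem.List.pyRange_neg_one_eq_reverse, List.map_reverse, List.reverse_append,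
        List.reverse_reverse, List.reverse_singleton]
    have h1 : (0:Int) + 1 = 1 := by ring
    have h2 : N - 2 + 1 = N - 1 := by ring
    rw [h1, h2]
    have hsplit : PySem.List.pyRange 1 N 1
        = PySem.List.pyRange 1 (N-1) 1 ++ PySem.List.pyRange (N-1) N 1 :=
      PySem.List.pyRange_one_append 1 (N-1) N (by omega) (by omega)
    have hsing : PySem.List.pyRange (N-1) N 1 = [N-1] := by
      rw [PySem.List.pyRange_one_cons (by omega : N - 1 < N),
          PySem.List.pyRange_one_eq_nil (by omega : N ≤ N - 1 + 1)]
    rw [hsplit, hsing, List.map_append]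
    congr 1
    simp only [List.map_cons, List.map_nil]
    congr 1
    rw [sm, if_neg (by omega : ¬ ((N-1).toNat + 1 < N.toNat))]
  rw [hrev]
  have hscan := scan_eq K N A (PySem.List.pyGetD A (-1) 0) (N - 1).toNat 0
    (PySem.List.pyGetD A 0 0) (by omega) le_rfl (by omega)
    (by
      simp only [Int.toNat_zero]
      rw [PySem.List.pyGetD_zero]
      simp [pm])
  have h01 : (0:Int) + 1 = 1 := by ring
  rw [h01] at hscan
  exact hscan

-- ===== VERDICT (by name: the statement is the Claim_ definition above) =====
theorem totalCuts_spec : Claim_equal_totalCuts := by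
  intro N K A _hDom _hPre
  unfold Spec_totalCuts
  by_cases hN : N ≤ 1
  · unfold totalCuts totalCuts_alt
    rw [if_pos hN]
    simp only
    rw [PySem.List.pyRange_one_eq_nil (by omega : N - 1 ≤ 0)]
    simp
  · rw [totalCuts_eq_count, alt_eq_count N K A (by omega)]
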